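-- pv_equiv track=rewrite | github.com/kaust-cs249-2020/asaad | Ch3/Ex11.py | graph_degrees
-- ===== SOURCE A (Python) =====
-- def graph_degrees(graph):
--     balance = {}
--     for key in graph.keys():
--         edges = graph[key]
--         if key in balance:
--             balance[key][1] = len(edges)
--         else:
--             balance[key] = [0, len(edges)]
--         for e in edges:
--             if e in balance:
--                 balance[e][0] = balance.get(e)[0] + 1
--             else:
--                 balance[e] = [1, 0]
--     return balance
-- ===== SOURCE B (Python) =====
-- def graph_degrees(graph):
--     # First-mention order of every node (keys interleaved with their edge targets).
--     mentions = []
--     for k in graph: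
--         mentions.append(k)
--         mentions.extend(graph[k])
--     # In-degree of every node = number of times it occurs as an edge target.
--     indeg = {}
--     for k in graph:
--         for e in graph[k]:
--             indeg[e] = indeg.get(e, 0) + 1
--     # Assemble: [in-degree, out-degree] per node, in first-mention order.
--     return {v: [indeg.get(v, 0), len(graph[v]) if v in graph else 0]
--             for v in dict.fromkeys(mentions)}
-- ===== Notes on version B (the rewrite author's own statement) =====
-- stated objective: alternative
-- what changed: A interleaves everything in one loop that mutates shared [in,out] cells in the balance dict; B never mutates cells: it derives the first-mention node order, counts in-degrees with a separate counter dict, and assembles the result in one final comprehension reading out-degrees directly from the input.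
import Mathlib
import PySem

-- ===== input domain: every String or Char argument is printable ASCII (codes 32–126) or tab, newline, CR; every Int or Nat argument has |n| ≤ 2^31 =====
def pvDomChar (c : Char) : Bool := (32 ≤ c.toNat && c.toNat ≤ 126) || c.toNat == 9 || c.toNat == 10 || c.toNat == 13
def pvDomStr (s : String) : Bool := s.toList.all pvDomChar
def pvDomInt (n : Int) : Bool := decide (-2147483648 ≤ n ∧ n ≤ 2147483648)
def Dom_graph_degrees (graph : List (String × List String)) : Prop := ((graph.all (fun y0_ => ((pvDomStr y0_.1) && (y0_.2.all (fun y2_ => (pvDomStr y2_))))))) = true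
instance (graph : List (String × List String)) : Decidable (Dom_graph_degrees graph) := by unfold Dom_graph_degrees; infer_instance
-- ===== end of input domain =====

-- B replaces A's single interleaved loop that mutates shared [in,out] cells by three independent
-- derivations (first-mention order, an in-degree counter, out-degrees read off the input) assembled
-- at the end; same asymptotic cost (objective: alternative).

-- ===== PORT A =====
-- balance is a Python dict mapping node -> two-element list [in, out]; the in-place element
-- assignments balance[key][1] = … / balance[e][0] = … are ported as re-inserting the stored list
-- with that element replaced (List.set; exact: the stored lists always have length 2, so the
-- indices 0 and 1 are in range and Python's element assignment never raises).
def graph_degrees (graph : List (String × List String)) : List (String × List Int) :=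
  (graph.foldl (fun balance kv =>
    let key := kv.1
    let edges := kv.2
    let balance :=
      if balance.contains key then
        -- balance[key][1] = len(edges)
        balance.insert key ((balance.getD key []).set 1 (edges.length : Int))
      else
        -- balance[key] = [0, len(edges)]
        balance.insert key [0, (edges.length : Int)]
    edges.foldl (fun b e =>
      if b.contains e then
        -- balance[e][0] = balance.get(e)[0] + 1
        b.insert e ((b.getD e []).set 0 ((b.getD e []).getD 0 0 + 1))
      else
        -- balance[e] = [1, 0]
        b.insert e [1, 0]) balance)
    (PySem.Dict.empty : PySem.Dict String (List Int))).items

-- ===== PORT B =====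
def graph_degrees_alt (graph : List (String × List String)) : List (String × List Int) :=
  -- mentions: every node in first-mention order (with repeats)
  let mentions := graph.foldl (fun acc kv => (acc ++ [kv.1]) ++ kv.2) []
  -- indeg[e] = indeg.get(e, 0) + 1 over all edge targets
  let indeg := graph.foldl (fun d kv => kv.2.foldl (fun d e => d.insert e (d.getD e 0 + 1)) d)
    (PySem.Dict.empty : PySem.Dict String Int)
  -- {v: [indeg.get(v, 0), len(graph[v]) if v in graph else 0] for v in dict.fromkeys(mentions)}
  (PySem.List.dedup mentions).map (fun v =>
    (v, [indeg.getD v 0,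
         match (PySem.Dict.mk graph).get? v with
         | some es => (es.length : Int)
         | none => 0]))

-- ===== PRECONDITION & SPEC =====
-- Pre_ excludes association lists with duplicate keys; A's argument is a Python dict, whose keys
-- are necessarily distinct, so no Python input is excluded.
def Pre_graph_degrees (graph : List (String × List String)) : Prop := (graph.map Prod.fst).Nodup
instance (graph : List (String × List String)) : Decidable (Pre_graph_degrees graph) := by
  unfold Pre_graph_degrees; infer_instance

def pvWitness_graph_degrees : (List (String × List String)) :=
  [("a", ["b", "a"]), ("b", []), ("c", ["a", "d"])]

def Spec_graph_degrees (graph : List (String × List String)) (out : List (String × List Int)) : Prop := out = graph_degrees_alt graph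
instance (graph : List (String × List String)) (out : List (String × List Int)) : Decidable (Spec_graph_degrees graph out) := by unfold Spec_graph_degrees; infer_instance

-- ===== CLAIM (what is proved, stated in full; the proofs are below) =====
def Claim_equal_graph_degrees : Prop := ∀ (graph : List (String × List String)), Dom_graph_degrees graph → Pre_graph_degrees graph → Spec_graph_degrees graph (graph_degrees graph)

-- ===== LEMMAS AND PROOFS =====

-- first-match lookup in the association list (what both a Python dict lookup and
-- PySem.Dict.mk give on it)
def gdLkp : List (String × List String) → String → Option (List String)
  | [], _ => none
  | (k, es) :: rest, v => if k = v then some es else gdLkp rest v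

lemma gdLkp_eq_mk_get? (P : List (String × List String)) (v : String) :
    (PySem.Dict.mk P).get? v = gdLkp P v := by
  induction P with
  | nil => rfl
  | cons kv rest ih =>
    obtain ⟨k, es⟩ := kv
    rw [PySem.Dict.get?_mk_cons, gdLkp]
    by_cases h : k = v <;> simp [h, ih]

lemma gdLkp_eq_none_of_not_mem (P : List (String × List String)) (v : String)
    (h : v ∉ P.map Prod.fst) : gdLkp P v = none := by
  induction P with
  | nil => rfl
  | cons kv rest ih =>
    obtain ⟨k, es⟩ := kv
    simp only [List.map_cons, List.mem_cons, not_or] at h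
    rw [gdLkp, if_neg (fun hh => h.1 hh.symm), ih h.2]

lemma gdSet_add_of_mem {s : PySem.Set String} {x : String} (h : x ∈ s) :
    PySem.Set.add s x = s := by
  simp [PySem.Set.add, PySem.Set.contains, h]

lemma gdSet_add_of_not_mem {s : PySem.Set String} {x : String} (h : x ∉ s) :
    PySem.Set.add s x = s ++ [x] := by
  simp [PySem.Set.add, PySem.Set.contains, h]

lemma gdSet_mem_update (l : List String) :
    ∀ (s : PySem.Set String) (x : String), x ∈ PySem.Set.update s l ↔ x ∈ s ∨ x ∈ l := by
  induction l with
  | nil => simp [PySem.Set.update]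
  | cons e l ih =>
    intro s x
    show x ∈ PySem.Set.update (PySem.Set.add s e) l ↔ _
    rw [ih, PySem.Set.mem_add]
    simp [or_assoc]

lemma gdSet_update_append (xs ys : List String) (s : PySem.Set String) :
    PySem.Set.update s (xs ++ ys) = PySem.Set.update (PySem.Set.update s xs) ys := by
  simp [PySem.Set.update, List.foldl_append]

-- the inner loop of A (over the edge list es) : every contained value gains es.count v on its
-- first component, keys grow by Set.update, nodup keys are preserved
lemma gd_inner (es : List String) :
    ∀ (b : PySem.Dict String (List Int)) (c o : String → Int),
    (∀ v, b.contains v = true → b.getD v [] = [c v, o v]) →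
    (∀ v, b.contains v = false → c v = 0 ∧ o v = 0) →
    (∀ v, (es.foldl (fun b e =>
        if b.contains e then
          b.insert e ((b.getD e []).set 0 ((b.getD e []).getD 0 0 + 1))
        else
          b.insert e [1, 0]) b).contains v = true →
      (es.foldl (fun b e =>
        if b.contains e then
          b.insert e ((b.getD e []).set 0 ((b.getD e []).getD 0 0 + 1))
        else
          b.insert e [1, 0]) b).getD v [] = [c v + (es.count v : Int), o v]) ∧
    (es.foldl (fun b e =>
        if b.contains e then
          b.insert e ((b.getD e []).set 0 ((b.getD e []).getD 0 0 + 1))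
        else
          b.insert e [1, 0]) b).keys = PySem.Set.update b.keys es ∧
    (b.keys.Nodup →
      (es.foldl (fun b e =>
        if b.contains e then
          b.insert e ((b.getD e []).set 0 ((b.getD e []).getD 0 0 + 1))
        else
          b.insert e [1, 0]) b).keys.Nodup) := by
  induction es with
  | nil =>
    intro b c o h1 h2
    refine ⟨fun v hv => ?_, rfl, fun h => h⟩
    simpa using h1 v hv
  | cons e es ih =>
    intro b c o h1 h2
    simp only [List.foldl_cons]
    by_cases hc : b.contains e = true
    · rw [if_pos hc]
      have hbe := h1 e hc
      have hval : (b.getD e []).set 0 ((b.getD e []).getD 0 0 + 1) = [c e + 1, o e] := by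
        rw [hbe]; rfl
      rw [hval]
      obtain ⟨ihA, ihB, ihC⟩ :=
        ih (b.insert e [c e + 1, o e]) (fun v => if v = e then c v + 1 else c v) o
          (by
            intro v hv
            rw [PySem.Dict.getD_insert]
            by_cases hve : v = e
            · simp [hve]
            · rw [if_neg hve]
              show b.getD v [] = [if v = e then c v + 1 else c v, o v]
              rw [if_neg hve]
              rw [PySem.Dict.contains_insert] at hv
              simp only [Bool.or_eq_true, beq_iff_eq, hve, false_or] at hv
              exact h1 v hv)
          (by
            intro v hv
            rw [PySem.Dict.contains_insert] at hv
            simp only [Bool.or_eq_false_iff, beq_eq_false_iff_ne, ne_eq] at hv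
            refine ⟨?_, (h2 v hv.2).2⟩
            show (if v = e then c v + 1 else c v) = 0
            rw [if_neg hv.1]
            exact (h2 v hv.2).1)
      refine ⟨fun v hv => ?_, ?_, fun hnd => ihC (PySem.Dict.nodup_keys_insert _ _ _ hnd)⟩
      · rw [ihA v hv]
        by_cases hve : v = e
        · subst hve
          simp
          ring
        · simp only [if_neg hve, List.count_cons]
          have : (e == v) = false := by simp [beq_eq_false_iff_ne]; exact fun hh => hve hh.symm
          simp [this]
      · rw [ihB, PySem.Dict.keys_insert_of_contains _ _ hc]
        have : PySem.Set.add b.keys e = b.keys :=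
          gdSet_add_of_mem ((PySem.Dict.contains_iff_mem_keys b e).mp hc)
        show PySem.Set.update b.keys es = PySem.Set.update (PySem.Set.add b.keys e) es
        rw [this]
    · rw [Bool.not_eq_true] at hc
      rw [if_neg (by simp [hc])]
      have hoe : c e = 0 ∧ o e = 0 := h2 e hc
      obtain ⟨ihA, ihB, ihC⟩ :=
        ih (b.insert e [1, 0]) (fun v => if v = e then 1 else c v) o
          (by
            intro v hv
            rw [PySem.Dict.getD_insert]
            by_cases hve : v = e
            · simp [hve, hoe.2]
            · rw [if_neg hve]
              show b.getD v [] = [if v = e then 1 else c v, o v]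
              rw [if_neg hve]
              rw [PySem.Dict.contains_insert] at hv
              simp only [Bool.or_eq_true, beq_iff_eq, hve, false_or] at hv
              exact h1 v hv)
          (by
            intro v hv
            rw [PySem.Dict.contains_insert] at hv
            simp only [Bool.or_eq_false_iff, beq_eq_false_iff_ne, ne_eq] at hv
            refine ⟨?_, (h2 v hv.2).2⟩
            show (if v = e then (1:Int) else c v) = 0
            rw [if_neg hv.1]
            exact (h2 v hv.2).1)
      refine ⟨fun v hv => ?_, ?_, fun hnd => ihC (PySem.Dict.nodup_keys_insert _ _ _ hnd)⟩
      · rw [ihA v hv]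
        by_cases hve : v = e
        · subst hve
          simp [hoe.1]
          ring
        · simp only [if_neg hve, List.count_cons]
          have : (e == v) = false := by simp [beq_eq_false_iff_ne]; exact fun hh => hve hh.symm
          simp [this]
      · rw [ihB, PySem.Dict.keys_insert_of_not_contains _ _ hc]
        have he : e ∉ b.keys := by
          intro hm
          rw [(PySem.Dict.contains_iff_mem_keys b e).mpr hm] at hc
          simp at hc
        show PySem.Set.update (b.keys ++ [e]) es = PySem.Set.update (PySem.Set.add b.keys e) es
        rw [gdSet_add_of_not_mem he]

-- the outer loop of A (stated with the let-bindings of the port's loop body expanded;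
-- the two lambdas are definitionally equal)
lemma gd_outer (P : List (String × List String)) :
    ∀ (b : PySem.Dict String (List Int)) (c o : String → Int),
    (∀ v, b.contains v = true → b.getD v [] = [c v, o v]) →
    (∀ v, b.contains v = false → c v = 0 ∧ o v = 0) →
    (∀ k ∈ P.map Prod.fst, o k = 0) →
    (P.map Prod.fst).Nodup →
    b.keys.Nodup →
    (∀ v, (P.foldl (fun balance kv =>
        kv.2.foldl (fun b e =>
          if b.contains e then
            b.insert e ((b.getD e []).set 0 ((b.getD e []).getD 0 0 + 1))
          else
            b.insert e [1, 0])
          (if balance.contains kv.1 then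
            balance.insert kv.1 ((balance.getD kv.1 []).set 1 (kv.2.length : Int))
          else
            balance.insert kv.1 [0, (kv.2.length : Int)])) b).contains v = true →
      (P.foldl (fun balance kv =>
        kv.2.foldl (fun b e =>
          if b.contains e then
            b.insert e ((b.getD e []).set 0 ((b.getD e []).getD 0 0 + 1))
          else
            b.insert e [1, 0])
          (if balance.contains kv.1 then
            balance.insert kv.1 ((balance.getD kv.1 []).set 1 (kv.2.length : Int))
          else
            balance.insert kv.1 [0, (kv.2.length : Int)])) b).getD v [] =
        [c v + ((P.flatMap Prod.snd).count v : Int),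
         match gdLkp P v with
         | some es => (es.length : Int)
         | none => o v]) ∧
    (P.foldl (fun balance kv =>
        kv.2.foldl (fun b e =>
          if b.contains e then
            b.insert e ((b.getD e []).set 0 ((b.getD e []).getD 0 0 + 1))
          else
            b.insert e [1, 0])
          (if balance.contains kv.1 then
            balance.insert kv.1 ((balance.getD kv.1 []).set 1 (kv.2.length : Int))
          else
            balance.insert kv.1 [0, (kv.2.length : Int)])) b).keys =
      PySem.Set.update b.keys (P.flatMap (fun kv => kv.1 :: kv.2)) ∧
    (P.foldl (fun balance kv =>
        kv.2.foldl (fun b e =>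
          if b.contains e then
            b.insert e ((b.getD e []).set 0 ((b.getD e []).getD 0 0 + 1))
          else
            b.insert e [1, 0])
          (if balance.contains kv.1 then
            balance.insert kv.1 ((balance.getD kv.1 []).set 1 (kv.2.length : Int))
          else
            balance.insert kv.1 [0, (kv.2.length : Int)])) b).keys.Nodup := by
  induction P with
  | nil =>
    intro b c o h1 h2 _ _ h5
    refine ⟨fun v hv => ?_, rfl, h5⟩
    simp only [List.foldl_nil] at hv ⊢
    rw [h1 v hv]
    simp [gdLkp]
  | cons kv P ih =>
    obtain ⟨k, es⟩ := kv
    intro b c o h1 h2 h3 h4 h5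
    have hk0 : o k = 0 := h3 k (by simp)
    have hknotP : k ∉ P.map Prod.fst := by
      simp only [List.map_cons, List.nodup_cons] at h4
      exact h4.1
    have hPnd : (P.map Prod.fst).Nodup := by
      simp only [List.map_cons, List.nodup_cons] at h4
      exact h4.2
    have hstep : (if b.contains k then
          b.insert k ((b.getD k []).set 1 (es.length : Int))
        else
          b.insert k [0, (es.length : Int)]) = b.insert k [c k, (es.length : Int)] := by
      by_cases hck : b.contains k = true
      · rw [if_pos hck, h1 k hck, hk0]
        rfl
      · rw [Bool.not_eq_true] at hck
        rw [if_neg (by simp [hck])]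
        rw [(h2 k hck).1]
    simp only [List.foldl_cons]
    rw [hstep]
    -- facts about the dict after inserting k
    have hb1get : ∀ v, (b.insert k [c k, (es.length : Int)]).contains v = true →
        (b.insert k [c k, (es.length : Int)]).getD v [] =
          [c v, if v = k then (es.length : Int) else o v] := by
      intro v hv
      rw [PySem.Dict.getD_insert]
      by_cases hvk : v = k
      · simp [hvk]
      · rw [if_neg hvk, if_neg hvk]
        rw [PySem.Dict.contains_insert] at hv
        simp only [Bool.or_eq_true, beq_iff_eq, hvk, false_or] at hv
        exact h1 v hv
    have hb1out : ∀ v, (b.insert k [c k, (es.length : Int)]).contains v = false →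
        c v = 0 ∧ (if v = k then (es.length : Int) else o v) = 0 := by
      intro v hv
      rw [PySem.Dict.contains_insert] at hv
      simp only [Bool.or_eq_false_iff, beq_eq_false_iff_ne, ne_eq] at hv
      rw [if_neg hv.1]
      exact h2 v hv.2
    obtain ⟨iA, iB, iC⟩ := gd_inner es (b.insert k [c k, (es.length : Int)]) c
      (fun v => if v = k then (es.length : Int) else o v) hb1get hb1out
    have hb2nd : (es.foldl (fun b e =>
        if b.contains e then
          b.insert e ((b.getD e []).set 0 ((b.getD e []).getD 0 0 + 1))
        else
          b.insert e [1, 0]) (b.insert k [c k, (es.length : Int)])).keys.Nodup :=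
      iC (PySem.Dict.nodup_keys_insert _ _ _ h5)
    have hb2out : ∀ v, (es.foldl (fun b e =>
        if b.contains e then
          b.insert e ((b.getD e []).set 0 ((b.getD e []).getD 0 0 + 1))
        else
          b.insert e [1, 0]) (b.insert k [c k, (es.length : Int)])).contains v = false →
        (c v + (es.count v : Int)) = 0 ∧ (if v = k then (es.length : Int) else o v) = 0 := by
      intro v hv
      rw [Bool.eq_false_iff, Ne, PySem.Dict.contains_iff_mem_keys, iB, gdSet_mem_update] at hv
      push Not at hv
      obtain ⟨hv1, hv2⟩ := hv
      rw [PySem.Dict.mem_keys_insert] at hv1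
      push Not at hv1
      have hcb : b.contains v = false := by
        rw [Bool.eq_false_iff, Ne, PySem.Dict.contains_iff_mem_keys]
        exact hv1.2
      refine ⟨?_, ?_⟩
      · rw [(h2 v hcb).1, List.count_eq_zero_of_not_mem hv2]
        rfl
      · rw [if_neg hv1.1]
        exact (h2 v hcb).2
    obtain ⟨jA, jB, jC⟩ := ih _ (fun v => c v + (es.count v : Int))
      (fun v => if v = k then (es.length : Int) else o v) iA hb2out
      (by
        intro k' hk'
        have : k' ≠ k := fun hh => hknotP (hh ▸ hk')
        show (if k' = k then (es.length : Int) else o k') = 0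
        rw [if_neg this]
        exact h3 k' (by simp [hk'] : k' ∈ (k :: P.map Prod.fst))) hPnd hb2nd
    refine ⟨fun v hv => ?_, ?_, jC⟩
    · rw [jA v hv]
      simp only [gdLkp, List.flatMap_cons, List.count_append, List.cons.injEq]
      by_cases hvk : v = k
      · subst hvk
        rw [gdLkp_eq_none_of_not_mem P v hknotP]
        refine ⟨by push_cast; ring, by simp, trivial⟩
      · rw [if_neg hvk, if_neg (fun (hh : k = v) => hvk hh.symm)]
        cases hlk : gdLkp P v with
        | none => exact ⟨by push_cast; ring, rfl, trivial⟩
        | some es' => exact ⟨by push_cast; ring, rfl, trivial⟩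
    · rw [jB, iB]
      have hb1k : (b.insert k [c k, (es.length : Int)]).keys = PySem.Set.add b.keys k := by
        by_cases hck : b.contains k = true
        · rw [PySem.Dict.keys_insert_of_contains _ _ hck,
            gdSet_add_of_mem ((PySem.Dict.contains_iff_mem_keys b k).mp hck)]
        · rw [Bool.not_eq_true] at hck
          rw [PySem.Dict.keys_insert_of_not_contains _ _ hck]
          have : k ∉ b.keys := by
            intro hm
            rw [(PySem.Dict.contains_iff_mem_keys b k).mpr hm] at hck
            simp at hck
          rw [gdSet_add_of_not_mem this]
      rw [hb1k, List.flatMap_cons]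
      rw [gdSet_update_append]
      rfl

-- indeg of B computes the edge-target count
lemma gd_indeg (P : List (String × List String)) :
    ∀ (d : PySem.Dict String Int) (v : String),
    (P.foldl (fun d kv => kv.2.foldl (fun d e => d.insert e (d.getD e 0 + 1)) d) d).getD v 0 =
      d.getD v 0 + ((P.flatMap Prod.snd).count v : Int) := by
  induction P with
  | nil => simp
  | cons kv rest ih =>
    intro d v
    simp only [List.foldl_cons, List.flatMap_cons, List.count_append, ih,
      PySem.Dict.getD_foldl_insert_add_one]
    push_cast
    ring

theorem graph_degrees_spec : Claim_equal_graph_degrees := by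
  intro graph _ hpre
  unfold Spec_graph_degrees graph_degrees graph_degrees_alt
  obtain ⟨hA, hB, hC⟩ := gd_outer graph (PySem.Dict.empty : PySem.Dict String (List Int))
    (fun _ => 0) (fun _ => 0)
    (by intro v hv; rw [PySem.Dict.contains_empty] at hv; cases hv)
    (fun v _ => ⟨rfl, rfl⟩) (fun k _ => rfl) hpre PySem.Dict.nodup_keys_empty
  have hkeys : (graph.foldl (fun balance kv =>
      kv.2.foldl (fun b e =>
        if b.contains e then
          b.insert e ((b.getD e []).set 0 ((b.getD e []).getD 0 0 + 1))
        else
          b.insert e [1, 0])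
        (if balance.contains kv.1 then
          balance.insert kv.1 ((balance.getD kv.1 []).set 1 (kv.2.length : Int))
        else
          balance.insert kv.1 [0, (kv.2.length : Int)]))
      (PySem.Dict.empty : PySem.Dict String (List Int))).keys =
      PySem.Set.ofList (graph.flatMap (fun kv => kv.1 :: kv.2)) := by
    rw [hB, PySem.Dict.keys_empty]
    rfl
  have hmention : graph.foldl (fun acc kv => (acc ++ [kv.1]) ++ kv.2) [] =
      graph.flatMap (fun kv => kv.1 :: kv.2) := by
    have hfun : (fun (acc : List String) (kv : String × List String) => (acc ++ [kv.1]) ++ kv.2) =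
        (fun acc kv => acc ++ (kv.1 :: kv.2)) := by
      funext acc kv
      simp
    rw [hfun, PySem.List.foldl_append_eq_flatMap, List.nil_append]
  show (graph.foldl (fun balance kv =>
      kv.2.foldl (fun b e =>
        if b.contains e then
          b.insert e ((b.getD e []).set 0 ((b.getD e []).getD 0 0 + 1))
        else
          b.insert e [1, 0])
        (if balance.contains kv.1 then
          balance.insert kv.1 ((balance.getD kv.1 []).set 1 (kv.2.length : Int))
        else
          balance.insert kv.1 [0, (kv.2.length : Int)]))
      (PySem.Dict.empty : PySem.Dict String (List Int))).items =
    (PySem.List.dedup (graph.foldl (fun acc kv => (acc ++ [kv.1]) ++ kv.2) [])).map (fun v =>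
      (v, [(graph.foldl (fun d kv => kv.2.foldl (fun d e => d.insert e (d.getD e 0 + 1)) d)
            (PySem.Dict.empty : PySem.Dict String Int)).getD v 0,
           match (PySem.Dict.mk graph).get? v with
           | some es => (es.length : Int)
           | none => 0]))
  rw [PySem.Dict.items_eq_map_keys _ hC [], hkeys, hmention]
  have hdedup : PySem.List.dedup (graph.flatMap (fun kv => kv.1 :: kv.2)) =
      PySem.Set.ofList (graph.flatMap (fun kv => kv.1 :: kv.2)) := rfl
  rw [hdedup]
  apply List.map_congr_left
  intro v hv
  have hvmem : v ∈ graph.flatMap (fun kv => kv.1 :: kv.2) :=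
    (PySem.Set.mem_ofList _ v).mp hv
  have hcont : (graph.foldl (fun balance kv =>
      kv.2.foldl (fun b e =>
        if b.contains e then
          b.insert e ((b.getD e []).set 0 ((b.getD e []).getD 0 0 + 1))
        else
          b.insert e [1, 0])
        (if balance.contains kv.1 then
          balance.insert kv.1 ((balance.getD kv.1 []).set 1 (kv.2.length : Int))
        else
          balance.insert kv.1 [0, (kv.2.length : Int)]))
      (PySem.Dict.empty : PySem.Dict String (List Int))).contains v = true := by
    rw [PySem.Dict.contains_iff_mem_keys, hkeys]
    exact hv
  rw [hA v hcont, gd_indeg graph PySem.Dict.empty v, PySem.Dict.getD_empty,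
    gdLkp_eq_mk_get? graph v]
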